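-- pv_equiv track=rewrite | github.com/TheMattBerman/attribution-dashboard-public | exa_search_integration.py | _analyze_sentiment_fallback
-- ===== SOURCE A (Python) =====
-- def _analyze_sentiment_fallback(text: str) -> str:
--     """Fallback rule-based sentiment analysis"""
--     text_lower = text.lower()
--
--     positive_indicators = [
--         'love', 'great', 'awesome', 'excellent', 'amazing', 'fantastic',
--         'recommend', 'best', 'perfect', 'outstanding', 'impressive',
--         'helpful', 'useful', 'valuable', 'effective', 'successful'
--     ]
--
--     negative_indicators = [
--         'hate', 'terrible', 'awful', 'worst', 'bad', 'disappointed',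
--         'avoid', 'sucks', 'horrible', 'useless', 'failed', 'broken',
--         'frustrating', 'annoying', 'expensive', 'overpriced'
--     ]
--
--     positive_count = sum(1 for word in positive_indicators if word in text_lower)
--     negative_count = sum(1 for word in negative_indicators if word in text_lower)
--
--     if positive_count > negative_count + 1:
--         return 'positive'
--     elif negative_count > positive_count + 1:
--         return 'negative'
--     else:
--         return 'neutral'
-- ===== SOURCE B (Python) =====
-- # B: instead of testing each keyword against the whole text, scan the text once,
-- # position by position; a first-character index maps each position's character to
-- # the few keywords that could start there, and each keyword found is recorded once
-- # in a dict of weights; the net score of the found words decides the label.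
--
-- _WEIGHTED = [
--     ('love', 1), ('great', 1), ('awesome', 1), ('excellent', 1), ('amazing', 1),
--     ('fantastic', 1), ('recommend', 1), ('best', 1), ('perfect', 1),
--     ('outstanding', 1), ('impressive', 1), ('helpful', 1), ('useful', 1),
--     ('valuable', 1), ('effective', 1), ('successful', 1),
--     ('hate', -1), ('terrible', -1), ('awful', -1), ('worst', -1), ('bad', -1),
--     ('disappointed', -1), ('avoid', -1), ('sucks', -1), ('horrible', -1),
--     ('useless', -1), ('failed', -1), ('broken', -1), ('frustrating', -1),
--     ('annoying', -1), ('expensive', -1), ('overpriced', -1),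
-- ]
--
-- _BY_FIRST = {}
-- for _w, _wt in _WEIGHTED:
--     _BY_FIRST.setdefault(_w[0], []).append((_w, _wt))
--
--
-- def _analyze_sentiment_fallback(text: str) -> str:
--     """Fallback rule-based sentiment analysis (single scan of the text)."""
--     t = text.lower()
--     found = {}
--     for i, ch in enumerate(t):
--         for word, weight in _BY_FIRST.get(ch, ()):
--             if word not in found and t.startswith(word, i):
--                 found[word] = weight
--     score = sum(found.values())
--     if score > 1:
--         return 'positive'
--     elif score < -1:
--         return 'negative'
--     else:
--         return 'neutral'
-- ===== Notes on version B (the rewrite author's own statement) =====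
-- stated objective: alternative
-- what changed: Instead of running 32 whole-text substring-membership tests (one per keyword), B scans the lowered text once, dispatching each position through a precomputed first-character index to the few keywords that could start there, records each keyword found once in a weight dict, and thresholds the net sum of the recorded weights.
import Mathlib
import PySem

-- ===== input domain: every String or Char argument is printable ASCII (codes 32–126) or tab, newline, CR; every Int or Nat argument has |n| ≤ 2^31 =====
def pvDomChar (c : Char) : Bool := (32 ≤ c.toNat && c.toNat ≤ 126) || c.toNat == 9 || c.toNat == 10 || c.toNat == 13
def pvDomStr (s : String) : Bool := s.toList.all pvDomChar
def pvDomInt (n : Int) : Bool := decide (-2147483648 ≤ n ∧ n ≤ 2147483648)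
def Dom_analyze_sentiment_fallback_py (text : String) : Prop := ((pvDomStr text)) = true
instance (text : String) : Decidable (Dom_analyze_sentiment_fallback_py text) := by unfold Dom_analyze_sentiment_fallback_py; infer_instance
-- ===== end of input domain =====

-- B scans the lowered text once, dispatching each position through a
-- first-character index to the keywords that could start there, recording each
-- keyword found once in a weight dict whose net sum decides the label
-- (objective: alternative — a text-scan with an index instead of 32 whole-text
-- membership tests).

-- ===== PORT A =====
def pvPositiveIndicators : List String :=
  ["love", "great", "awesome", "excellent", "amazing", "fantastic",
   "recommend", "best", "perfect", "outstanding", "impressive",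
   "helpful", "useful", "valuable", "effective", "successful"]

def pvNegativeIndicators : List String :=
  ["hate", "terrible", "awful", "worst", "bad", "disappointed",
   "avoid", "sucks", "horrible", "useless", "failed", "broken",
   "frustrating", "annoying", "expensive", "overpriced"]

def analyze_sentiment_fallback_py (text : String) : String :=
  let text_lower := PySem.Str.lower text
  let positive_count : Int :=
    pvPositiveIndicators.foldl
      (fun acc word => if PySem.Str.isIn word text_lower then acc + 1 else acc) 0
  let negative_count : Int :=
    pvNegativeIndicators.foldl
      (fun acc word => if PySem.Str.isIn word text_lower then acc + 1 else acc) 0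
  if positive_count > negative_count + 1 then "positive"
  else if negative_count > positive_count + 1 then "negative"
  else "neutral"

-- ===== PORT B =====
-- the module-level _BY_FIRST dict of Source B (first character → its keywords, in order)
def pvByFirst : PySem.Dict Char (List (String × Int)) :=
  PySem.Dict.mk
    [('l', [("love", 1)]),
     ('g', [("great", 1)]),
     ('a', [("awesome", 1), ("amazing", 1), ("awful", -1), ("avoid", -1), ("annoying", -1)]),
     ('e', [("excellent", 1), ("effective", 1), ("expensive", -1)]),
     ('f', [("fantastic", 1), ("failed", -1), ("frustrating", -1)]),
     ('r', [("recommend", 1)]),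
     ('b', [("best", 1), ("bad", -1), ("broken", -1)]),
     ('p', [("perfect", 1)]),
     ('o', [("outstanding", 1), ("overpriced", -1)]),
     ('i', [("impressive", 1)]),
     ('h', [("helpful", 1), ("hate", -1), ("horrible", -1)]),
     ('u', [("useful", 1), ("useless", -1)]),
     ('v', [("valuable", 1)]),
     ('s', [("successful", 1), ("sucks", -1)]),
     ('t', [("terrible", -1)]),
     ('w', [("worst", -1)]),
     ('d', [("disappointed", -1)])]

-- body of the inner 'for word, weight in _BY_FIRST.get(ch, ())' loop;
-- t.startswith(word, i) with 0 ≤ i (from enumerate) is exact as a prefix test on t.drop i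
def pvInner (t : List Char) (i : Nat) (fd : PySem.Dict String Int)
    (q : String × Int) : PySem.Dict String Int :=
  if !(fd.contains q.1) && PySem.Chars.startswith (t.drop i) q.1.toList then
    fd.insert q.1 q.2
  else fd

-- body of the outer 'for i, ch in enumerate(t)' loop
def pvStepB (t : List Char) (fd : PySem.Dict String Int) (p : Int × Char) :
    PySem.Dict String Int :=
  (PySem.Dict.getD pvByFirst p.2 []).foldl (pvInner t p.1.toNat) fd

def analyze_sentiment_fallback_py_alt (text : String) : String :=
  let t := (PySem.Str.lower text).toList
  let found := (PySem.List.enumerate t).foldl (pvStepB t) (PySem.Dict.mk [])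
  let score : Int := (PySem.Dict.values found).foldl (· + ·) 0
  if score > 1 then "positive"
  else if score < -1 then "negative"
  else "neutral"

-- ===== PRECONDITION & SPEC =====
def Spec_analyze_sentiment_fallback_py (text : String) (out : String) : Prop :=
  out = analyze_sentiment_fallback_py_alt text
instance (text : String) (out : String) : Decidable (Spec_analyze_sentiment_fallback_py text out) := by
  unfold Spec_analyze_sentiment_fallback_py; infer_instance

-- ===== CLAIM =====
def Claim_equal_analyze_sentiment_fallback_py : Prop :=
  ∀ (text : String), Dom_analyze_sentiment_fallback_py text →
    Spec_analyze_sentiment_fallback_py text (analyze_sentiment_fallback_py text)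

-- ===== LEMMAS AND PROOFS =====

-- the module-level _WEIGHTED list of Source B
def pvWeighted : List (String × Int) :=
  [("love", 1), ("great", 1), ("awesome", 1), ("excellent", 1), ("amazing", 1),
   ("fantastic", 1), ("recommend", 1), ("best", 1), ("perfect", 1),
   ("outstanding", 1), ("impressive", 1), ("helpful", 1), ("useful", 1),
   ("valuable", 1), ("effective", 1), ("successful", 1),
   ("hate", -1), ("terrible", -1), ("awful", -1), ("worst", -1), ("bad", -1),
   ("disappointed", -1), ("avoid", -1), ("sucks", -1), ("horrible", -1),
   ("useless", -1), ("failed", -1), ("broken", -1), ("frustrating", -1),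
   ("annoying", -1), ("expensive", -1), ("overpriced", -1)]

-- the substring predicate both programs decide, per keyword
def pvHit (t : List Char) (w : String) : Bool := PySem.Chars.isIn w.toList t

-- every bucket of pvByFirst consists of entries of pvWeighted
theorem pvBucket_sub (c : Char) (q : String × Int)
    (hq : q ∈ PySem.Dict.getD pvByFirst c []) : q ∈ pvWeighted := by
  unfold PySem.Dict.getD PySem.Dict.get? at hq
  cases h : List.find? (fun p => p.1 == c) pvByFirst.items with
  | none => rw [h] at hq; simp at hq
  | some b =>
    rw [h] at hq
    simp only [Option.map_some, Option.getD_some] at hq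
    have hb := List.mem_of_find?_eq_some h
    have : ∀ b ∈ pvByFirst.items, ∀ q' ∈ b.2, q' ∈ pvWeighted := by decide
    exact this b hb q hq

-- every weighted keyword appears in the bucket of its first character
theorem pvBucket_hit : ∀ q ∈ pvWeighted,
    q ∈ PySem.Dict.getD pvByFirst (q.1.toList.headD ' ') [] := by decide

theorem pvWeighted_nodup : pvWeighted.Nodup := by decide

theorem pvWeighted_ne_nil : ∀ q ∈ pvWeighted, q.1.toList ≠ [] := by decide

theorem pvWeighted_val_eq : ∀ p ∈ pvWeighted, ∀ q ∈ pvWeighted, p.1 = q.1 → p.2 = q.2 := by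
  decide

-- ---- inner loop invariant ----
theorem pvInner_inv (t : List Char) (i : Nat) :
    ∀ (L : List (String × Int)) (fd : PySem.Dict String Int),
      fd.keys.Nodup →
      (L.foldl (pvInner t i) fd).keys.Nodup ∧
      (∀ p, p ∈ (L.foldl (pvInner t i) fd).items →
          p ∈ fd.items ∨ (p ∈ L ∧ PySem.Chars.startswith (t.drop i) p.1.toList = true)) ∧
      (∀ w, fd.contains w = true → (L.foldl (pvInner t i) fd).contains w = true) ∧
      (∀ q ∈ L, PySem.Chars.startswith (t.drop i) q.1.toList = true →
          (L.foldl (pvInner t i) fd).contains q.1 = true) := by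
  intro L
  induction L with
  | nil => intro fd h; exact ⟨h, fun p hp => Or.inl hp, fun w hw => hw, by simp⟩
  | cons q L ih =>
    intro fd hnd
    simp only [List.foldl_cons]
    by_cases hg : (!(fd.contains q.1) && PySem.Chars.startswith (t.drop i) q.1.toList) = true
    · have hstep : pvInner t i fd q = fd.insert q.1 q.2 := by
        unfold pvInner; rw [hg]; simp
      obtain ⟨hg1, hg2⟩ := Bool.and_eq_true_iff.mp hg
      rw [hstep]
      obtain ⟨ih1, ih2, ih3, ih4⟩ := ih (fd.insert q.1 q.2) (PySem.Dict.nodup_keys_insert fd q.1 q.2 hnd)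
      refine ⟨ih1, ?_, ?_, ?_⟩
      · intro p hp
        rcases ih2 p hp with hp' | hp'
        · rw [PySem.Dict.mem_items_insert] at hp'
          rcases hp' with rfl | ⟨hp', _⟩
          · exact Or.inr ⟨List.mem_cons_self, hg2⟩
          · exact Or.inl hp'
        · exact Or.inr ⟨List.mem_cons_of_mem _ hp'.1, hp'.2⟩
      · intro w hw
        exact ih3 w (by rw [PySem.Dict.contains_insert]; simp [hw])
      · intro q' hq' hs
        rcases List.mem_cons.mp hq' with rfl | hq'
        · exact ih3 q'.1 (by rw [PySem.Dict.contains_insert]; simp)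
        · exact ih4 q' hq' hs
    · have hstep : pvInner t i fd q = fd := by
        unfold pvInner; rw [Bool.eq_false_iff.mpr hg]; simp
      rw [hstep]
      obtain ⟨ih1, ih2, ih3, ih4⟩ := ih fd hnd
      refine ⟨ih1, ?_, ih3, ?_⟩
      · intro p hp
        rcases ih2 p hp with hp' | hp'
        · exact Or.inl hp'
        · exact Or.inr ⟨List.mem_cons_of_mem _ hp'.1, hp'.2⟩
      · intro q' hq' hs
        rcases List.mem_cons.mp hq' with rfl | hq'
        · -- guard failed but startswith holds: q' was already present
          have hc : fd.contains q'.1 = true := by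
            by_contra hc
            have hc' : fd.contains q'.1 = false := Bool.eq_false_iff.mpr hc
            exact hg (by simp [hc', hs])
          exact ih3 q'.1 hc
        · exact ih4 q' hq' hs

-- ---- outer loop invariant ----
theorem pvOuter_inv (t : List Char) :
    ∀ (l : List Char) (k : Nat) (fd : PySem.Dict String Int),
      l = t.drop k →
      fd.keys.Nodup →
      (∀ p, p ∈ fd.items → p ∈ pvWeighted ∧ ∃ i < k, p.1.toList <+: t.drop i) →
      (∀ q ∈ pvWeighted, (∃ i < k, q.1.toList <+: t.drop i) → fd.contains q.1 = true) →
      ((PySem.List.enumerate l k).foldl (pvStepB t) fd).keys.Nodup ∧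
      (∀ p, p ∈ ((PySem.List.enumerate l k).foldl (pvStepB t) fd).items →
          p ∈ pvWeighted ∧ ∃ i < k + l.length, p.1.toList <+: t.drop i) ∧
      (∀ q ∈ pvWeighted, (∃ i < k + l.length, q.1.toList <+: t.drop i) →
          ((PySem.List.enumerate l k).foldl (pvStepB t) fd).contains q.1 = true) := by
  intro l
  induction l with
  | nil =>
    intro k fd _ h1 h2 h3
    simp only [PySem.List.enumerate_nil, List.foldl_nil, List.length_nil, Nat.add_zero]
    exact ⟨h1, h2, h3⟩
  | cons c l ih =>
    intro k fd hl hnd h2 h3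
    have hdropk : t.drop k = c :: l := hl.symm
    have hdrop1 : t.drop (k + 1) = l := by
      rw [← List.drop_drop, hdropk]; rfl
    rw [PySem.List.enumerate_cons]
    simp only [List.foldl_cons]
    have hcast : (k : Int) + 1 = ((k + 1 : Nat) : Int) := by push_cast; ring
    rw [hcast]
    -- the single step at position k
    have hstep : pvStepB t fd ((k : Int), c)
        = (PySem.Dict.getD pvByFirst c []).foldl (pvInner t k) fd := by
      unfold pvStepB; simp
    rw [hstep]
    obtain ⟨i1, i2, i3, i4⟩ := pvInner_inv t k (PySem.Dict.getD pvByFirst c []) fd hnd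
    set fd1 := (PySem.Dict.getD pvByFirst c []).foldl (pvInner t k) fd with hfd1
    have h2' : ∀ p, p ∈ fd1.items → p ∈ pvWeighted ∧ ∃ i < k + 1, p.1.toList <+: t.drop i := by
      intro p hp
      rcases i2 p hp with hp' | ⟨hpL, hps⟩
      · obtain ⟨hw, i, hik, hpre⟩ := h2 p hp'
        exact ⟨hw, i, Nat.lt_succ_of_lt hik, hpre⟩
      · refine ⟨pvBucket_sub c p hpL, k, Nat.lt_succ_self k, ?_⟩
        exact (PySem.Chars.startswith_iff _ _).mp hps
    have h3' : ∀ q ∈ pvWeighted, (∃ i < k + 1, q.1.toList <+: t.drop i) →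
        fd1.contains q.1 = true := by
      intro q hq ⟨i, hik, hpre⟩
      rcases Nat.lt_succ_iff_lt_or_eq.mp hik with hik' | rfl
      · exact i3 q.1 (h3 q hq ⟨i, hik', hpre⟩)
      · -- a new hit exactly at position i = k: q is in bucket c
        have hne := pvWeighted_ne_nil q hq
        obtain ⟨d, w', hq1⟩ := List.exists_cons_of_ne_nil hne
        have hd : d = c := by
          obtain ⟨s, hs⟩ := hpre
          rw [hq1, hdropk] at hs
          exact (List.cons.injEq _ _ _ _ ▸ hs).1
        have hbucket : q ∈ PySem.Dict.getD pvByFirst c [] := by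
          have := pvBucket_hit q hq
          rwa [hq1, hd] at this
        refine i4 q hbucket ?_
        rw [PySem.Chars.startswith_iff]
        exact hpre
    obtain ⟨o1, o2, o3⟩ := ih (k + 1) fd1 hdrop1.symm i1 h2' h3'
    refine ⟨o1, ?_, ?_⟩
    · intro p hp
      obtain ⟨hw, i, hik, hpre⟩ := o2 p hp
      exact ⟨hw, i, by simp only [List.length_cons]; omega, hpre⟩
    · intro q hq ⟨i, hik, hpre⟩
      refine o3 q hq ⟨i, ?_, hpre⟩
      simp only [List.length_cons] at hik
      omega

-- characterisation of the dict B builds over the whole text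
theorem pvFound_spec (t : List Char) :
    let found := (PySem.List.enumerate t).foldl (pvStepB t) (PySem.Dict.mk [])
    found.items.Perm (pvWeighted.filter (fun p => pvHit t p.1)) := by
  intro found
  have h0 : (PySem.Dict.mk ([] : List (String × Int))).keys.Nodup := by
    simp [PySem.Dict.keys]
  obtain ⟨hnd, h2, h3⟩ := pvOuter_inv t t 0 (PySem.Dict.mk []) (by simp) h0
    (by intro p hp; simp at hp) (by intro q _ ⟨i, hi, _⟩; omega)
  have hitems_nodup : found.items.Nodup :=
    (List.Nodup.of_map _ hnd)
  have hfilter_nodup : (pvWeighted.filter (fun p => pvHit t p.1)).Nodup :=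
    List.Nodup.filter _ pvWeighted_nodup
  rw [List.perm_ext_iff_of_nodup hitems_nodup hfilter_nodup]
  intro p
  simp only [List.mem_filter]
  constructor
  · intro hp
    obtain ⟨hw, i, _, hpre⟩ := h2 p hp
    refine ⟨hw, ?_⟩
    unfold pvHit
    exact (PySem.Chars.exists_prefix_drop_iff_isIn _ _).mp ⟨i, hpre⟩
  · rintro ⟨hw, hhit⟩
    obtain ⟨j, hpre⟩ := (PySem.Chars.exists_prefix_drop_iff_isIn p.1.toList t).mpr hhit
    have hjlt : j < t.length := by
      by_contra hj
      rw [List.drop_eq_nil_of_le (by omega)] at hpre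
      exact pvWeighted_ne_nil p hw (List.prefix_nil.mp hpre)
    have hc := h3 p hw ⟨j, by omega, hpre⟩
    rw [PySem.Dict.contains_iff_mem_keys] at hc
    obtain ⟨p', hp', hp'1⟩ := List.mem_map.mp hc
    obtain ⟨hw', _⟩ := h2 p' hp'
    have hv : p'.2 = p.2 := pvWeighted_val_eq p' hw' p hw hp'1
    have hpp : p' = p := Prod.ext hp'1 hv
    exact hpp ▸ hp'

-- foldl (·+·) 0 is List.sum, with the accumulator shifted out
theorem pvFoldlSum (l : List Int) (a : Int) : l.foldl (· + ·) a = a + l.sum := by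
  induction l generalizing a with
  | nil => simp
  | cons h tl ih => simp only [List.foldl_cons, List.sum_cons]; rw [ih]; ring

-- A-side count as countP
theorem pvFoldlCount (tl : String) (l : List String) (acc : Int) :
    l.foldl (fun a w => if PySem.Str.isIn w tl then a + 1 else a) acc
      = acc + l.foldl (fun a w => if PySem.Str.isIn w tl then a + 1 else a) 0 := by
  induction l generalizing acc with
  | nil => simp
  | cons h tl' ih =>
    simp only [List.foldl_cons]
    rw [ih, ih (if PySem.Str.isIn h tl then (0:Int) + 1 else 0)]
    split <;> ring

theorem pvCountEq (tl : String) (l : List String) :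
    l.foldl (fun acc word => if PySem.Str.isIn word tl then acc + 1 else acc) (0 : Int)
      = (l.countP (fun w => pvHit tl.toList w) : Int) := by
  induction l with
  | nil => simp
  | cons h tl' ih =>
    simp only [List.foldl_cons, List.countP_cons]
    rw [pvFoldlCount, ih]
    simp only [pvHit, ← PySem.Str.isIn_eq]
    split <;> push_cast <;> ring

-- sum of weights of a constant-weight block after filtering
theorem pvBlockSum (t : List Char) (l : List String) (w : Int) :
    (((l.map (fun s => (s, w))).filter (fun p => pvHit t p.1)).map Prod.snd).sum
      = w * (l.countP (fun s => pvHit t s) : Int) := by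
  induction l with
  | nil => simp
  | cons h tl ih =>
    simp only [List.map_cons, List.filter_cons, List.countP_cons]
    by_cases hh : pvHit t h = true
    · simp only [hh, if_pos, List.map_cons, List.sum_cons, ih]
      push_cast; ring
    · simp only [hh, Bool.false_eq_true, if_false, ih]
      push_cast; ring

theorem pvWeightedSplit :
    pvWeighted = pvPositiveIndicators.map (fun s => (s, (1:Int)))
                  ++ pvNegativeIndicators.map (fun s => (s, (-1:Int))) := by decide

-- B's score = A's positive count − A's negative count
theorem pvScoreEq (text : String) :
    (PySem.Dict.values ((PySem.List.enumerate (PySem.Str.lower text).toList).foldl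
        (pvStepB (PySem.Str.lower text).toList) (PySem.Dict.mk []))).foldl (· + ·) 0
      = pvPositiveIndicators.foldl
          (fun acc word => if PySem.Str.isIn word (PySem.Str.lower text) then acc + 1 else acc) 0
        - pvNegativeIndicators.foldl
          (fun acc word => if PySem.Str.isIn word (PySem.Str.lower text) then acc + 1 else acc) 0 := by
  set t := (PySem.Str.lower text).toList with ht
  have hperm := pvFound_spec t
  rw [pvFoldlSum, PySem.Dict.values]
  have hsum : (((PySem.List.enumerate t).foldl (pvStepB t) (PySem.Dict.mk [])).items.map Prod.snd).sum
      = ((pvWeighted.filter (fun p => pvHit t p.1)).map Prod.snd).sum :=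
    List.Perm.sum_eq (List.Perm.map _ hperm)
  rw [hsum, pvWeightedSplit, List.filter_append, List.map_append, List.sum_append,
    pvBlockSum, pvBlockSum, pvCountEq, pvCountEq]
  ring

-- ===== VERDICT =====
theorem analyze_sentiment_fallback_py_spec : Claim_equal_analyze_sentiment_fallback_py := by
  intro text _
  unfold Spec_analyze_sentiment_fallback_py
  unfold analyze_sentiment_fallback_py analyze_sentiment_fallback_py_alt
  simp only []
  rw [pvScoreEq text]
  split_ifs <;> first | rfl | omega
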